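-- pv_equiv track=rewrite | github.com/miaomiaoxu999-cell/researchpipe | backend/scripts/playground_audit.py | fill_path
-- ===== SOURCE A (Python) =====
-- def fill_path(path: str, ep_id: str) -> str:
--     """Replace {param} placeholders with sample IDs."""
--     samples = {
--         "{cid}": "智元机器人",
--         "{iid}": "1",
--         "{did}": "1",
--         "{fid}": "fil_test",
--         "{ind}": "人工智能",
--         "{wid}": "watch_test",
--         "{id}": "test_id",
--         "{job_id}": "req_test",
--     }
--     for placeholder, value in samples.items():
--         path = path.replace(placeholder, value)
--     return path
-- ===== SOURCE B (Python) =====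
-- def fill_path(path: str, ep_id: str) -> str:
--     """Replace {param} placeholders with sample IDs."""
--     samples = {
--         "cid": "智元机器人",
--         "iid": "1",
--         "did": "1",
--         "fid": "fil_test",
--         "ind": "人工智能",
--         "wid": "watch_test",
--         "id": "test_id",
--         "job_id": "req_test",
--     }
--     out = []
--     i = 0
--     n = len(path)
--     while i < n:
--         c = path[i]
--         if c == "{":
--             j = path.find("}", i + 1)
--             if j != -1 and path[i + 1 : j] in samples:
--                 out.append(samples[path[i + 1 : j]])
--                 i = j + 1
--                 continue
--         out.append(c)
--         i += 1
--     return "".join(out)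
-- ===== Notes on version B (the rewrite author's own statement) =====
-- stated objective: alternative
-- what changed: B makes one left-to-right pass with an output accumulator: at each '{' it finds the next '}' and looks the enclosed bare name up in a dict, instead of A's eight sequential full-string replace passes.
import Mathlib
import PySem

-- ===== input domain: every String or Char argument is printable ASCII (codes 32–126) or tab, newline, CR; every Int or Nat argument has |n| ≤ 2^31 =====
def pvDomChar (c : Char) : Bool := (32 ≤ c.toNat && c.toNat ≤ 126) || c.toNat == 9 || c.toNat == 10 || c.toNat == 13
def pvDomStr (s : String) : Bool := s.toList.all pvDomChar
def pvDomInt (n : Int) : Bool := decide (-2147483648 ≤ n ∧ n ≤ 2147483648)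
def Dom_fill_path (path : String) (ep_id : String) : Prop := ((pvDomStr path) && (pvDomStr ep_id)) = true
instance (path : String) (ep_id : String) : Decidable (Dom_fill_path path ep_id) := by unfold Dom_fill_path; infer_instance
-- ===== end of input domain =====

-- B replaces A's eight sequential full-string `.replace` passes by a single left-to-right parse:
-- at each '{' it finds the next '}' and looks the enclosed name up in a table of bare names.

-- ===== PORT A =====
-- the samples dict of A, as an association list in insertion order
def pvSamplesA : List (String × String) :=
  [("{cid}", "智元机器人"), ("{iid}", "1"), ("{did}", "1"), ("{fid}", "fil_test"),
   ("{ind}", "人工智能"), ("{wid}", "watch_test"), ("{id}", "test_id"), ("{job_id}", "req_test")]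

-- for placeholder, value in samples.items(): path = path.replace(placeholder, value)
def fill_path (path : String) (ep_id : String) : String :=
  pvSamplesA.foldl (fun p kv => PySem.Str.replace p kv.1 kv.2) path

-- ===== PORT B =====
-- B's samples dict: bare placeholder names → values
def pvNamesB : List (List Char × List Char) :=
  [("cid".toList, "智元机器人".toList), ("iid".toList, "1".toList), ("did".toList, "1".toList),
   ("fid".toList, "fil_test".toList), ("ind".toList, "人工智能".toList),
   ("wid".toList, "watch_test".toList), ("id".toList, "test_id".toList),
   ("job_id".toList, "req_test".toList)]

-- path.find("}", i+1) over the remaining characters: index of the first '}' (exact: -1 ↦ none)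
def pvFindClose : List Char → Option Nat
  | [] => none
  | c :: cs => if c = '}' then some 0 else (pvFindClose cs).map (· + 1)

-- the while-loop of B: copy characters; at '{' with a following '}' enclosing a known name,
-- emit the name's value and resume after the '}'
def pvParseB : List Char → List Char
  | [] => []
  | c :: cs =>
    if c = '{' then
      match pvFindClose cs with
      | some j =>
        match pvNamesB.find? (fun kv => kv.1 == cs.take j) with
        | some kv => kv.2 ++ pvParseB (cs.drop (j + 1))
        | none => c :: pvParseB cs
      | none => c :: pvParseB cs
    else c :: pvParseB cs
termination_by l => l.length
decreasing_by
  all_goals simp only [List.length_drop, List.length_cons]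
  all_goals omega

def fill_path_alt (path : String) (ep_id : String) : String :=
  String.ofList (pvParseB path.toList)

-- ===== PRECONDITION & SPEC =====
def Spec_fill_path (path : String) (ep_id : String) (out : String) : Prop := out = fill_path_alt path ep_id
instance (path : String) (ep_id : String) (out : String) : Decidable (Spec_fill_path path ep_id out) := by unfold Spec_fill_path; infer_instance

-- ===== CLAIM (what is proved, stated in full; the proofs are below) =====
def Claim_equal_fill_path : Prop := ∀ (path : String) (ep_id : String), Dom_fill_path path ep_id → Spec_fill_path path ep_id (fill_path path ep_id)

-- ===== LEMMAS AND PROOFS =====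

-- A's keys with braces, paired with the values (proof-only bridge between the two tables)
def pvKeysB : List (List Char × List Char) :=
  pvSamplesA.map (fun kv => (kv.1.toList, kv.2.toList))

-- proof-only intermediate: one scan matching full keys by find?-on-prefix
def pvScanB : List Char → List Char
  | [] => []
  | c :: cs =>
    match pvKeysB.find? (fun kv => kv.1.isPrefixOf (c :: cs)) with
    | some kv => kv.2 ++ pvScanB (cs.drop (kv.1.length - 1))
    | none => c :: pvScanB cs
termination_by l => l.length
decreasing_by
  · simp only [List.length_drop, List.length_cons]; omega
  · simp

-- a structural recursion equivalent to PySem.Chars.replace (for a nonempty pattern)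
def pvRepl (old new : List Char) : List Char → List Char
  | [] => []
  | c :: t =>
    if old.isPrefixOf (c :: t) then new ++ pvRepl old new (t.drop (old.length - 1))
    else c :: pvRepl old new t
termination_by l => l.length
decreasing_by
  · simp only [List.length_drop, List.length_cons]; omega
  · simp

theorem pvGo_eq (old new : List Char) (h : old ≠ []) :
    ∀ fuel l acc, l.length ≤ fuel →
      PySem.Chars.replace.go old new fuel l acc = acc.reverse ++ pvRepl old new l := by
  intro fuel
  induction fuel with
  | zero =>
    intro l acc hl
    have : l = [] := List.eq_nil_of_length_eq_zero (Nat.le_zero.mp hl)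
    subst this
    rw [PySem.Chars.replace.go]
    simp [pvRepl]
  | succ fuel ih =>
    intro l acc hl
    cases l with
    | nil =>
      rw [PySem.Chars.replace.go]
      · simp [pvRepl]
      · omega
    | cons c t =>
      rw [PySem.Chars.replace.go]
      by_cases hpre : old <+: (c :: t)
      · have hb : old.isPrefixOf (c :: t) = true := List.isPrefixOf_iff_prefix.mpr hpre
        simp only [hb, if_pos]
        obtain ⟨c0, ot, rfl⟩ := List.exists_cons_of_ne_nil h
        have hlen : (List.drop (c0 :: ot).length (c :: t)).length ≤ fuel := by
          simp at hl ⊢; omega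
        rw [ih _ _ hlen]
        rw [pvRepl]
        simp only [hb, if_pos]
        have hdrop : List.drop (c0 :: ot).length (c :: t) = List.drop ((c0 :: ot).length - 1) t := by
          simp
        rw [hdrop]
        simp
      · have hb : old.isPrefixOf (c :: t) = false := by
          rw [← Bool.not_eq_true, List.isPrefixOf_iff_prefix]; exact hpre
        simp only [hb]
        have hlen : t.length ≤ fuel := by simp at hl; omega
        rw [ih _ _ hlen]
        rw [pvRepl]
        simp [hb]

theorem pvReplace_eq (old new s : List Char) (h : old ≠ []) :
    PySem.Chars.replace s old new = pvRepl old new s := by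
  rw [PySem.Chars.replace]
  rw [if_neg (by simpa [List.isEmpty_iff] using h)]
  simpa using pvGo_eq old new h s.length s [] le_rfl

-- basic equations for pvRepl
theorem pvRepl_pass (o n : List Char) (c : Char) (t : List Char) (h : ¬ o <+: (c :: t)) :
    pvRepl o n (c :: t) = c :: pvRepl o n t := by
  rw [pvRepl]; simp [List.isPrefixOf_iff_prefix, h]

theorem pvRepl_hit (o n x : List Char) (h : o ≠ []) :
    pvRepl o n (o ++ x) = n ++ pvRepl o n x := by
  obtain ⟨c, ot, rfl⟩ := List.exists_cons_of_ne_nil h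
  rw [List.cons_append, pvRepl]
  simp [List.isPrefixOf_iff_prefix, List.prefix_append]

theorem pvNot_prefix_head (o : List Char) (c : Char) (y : List Char)
    (hk : o.head? = some '{') (hc : c ≠ '{') : ¬ o <+: (c :: y) := by
  intro h
  obtain ⟨c0, ot, rfl⟩ : ∃ c0 ot, o = c0 :: ot := by
    cases o with
    | nil => simp at hk
    | cons a b => exact ⟨a, b, rfl⟩
  simp at hk
  rw [List.cons_prefix_cons] at h
  exact hc (h.1 ▸ hk.symm ▸ rfl)

theorem pvRepl_pass_clean (o n : List Char) (hk : o.head? = some '{') :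
    ∀ p x, '{' ∉ p → pvRepl o n (p ++ x) = p ++ pvRepl o n x := by
  intro p
  induction p with
  | nil => simp
  | cons c p' ih =>
    intro x hp
    have hc : c ≠ '{' := by intro h; exact hp (by simp [h])
    rw [List.cons_append, pvRepl_pass o n c (p' ++ x) (pvNot_prefix_head o c _ hk hc)]
    rw [ih x (fun h => hp (List.mem_cons_of_mem _ h))]
    rfl

theorem pvTake_prefix_of_prefix_append (k m x : List Char) (h : k <+: m ++ x) :
    k.take m.length <+: m := by
  have h1 : k.take m.length <+: m ++ x := (List.take_prefix _ _).trans h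
  exact List.prefix_of_prefix_length_le h1 (List.prefix_append m x) (by simp)

-- a nonempty chunk that ends in '}', has no earlier '}', and does not contain the value v
-- cannot be created by replacing occurrences of k with v: it was already a prefix
theorem pvNoCreate (k v : List Char) (hv : '}' ∉ v) :
    ∀ cs s, s ≠ [] → s.getLast? = some '}' → '}' ∉ s.dropLast → ¬ v <:+: s →
      s <+: pvRepl k v cs → s <+: cs := by
  intro cs
  induction cs with
  | nil =>
    intro s hne _ _ _ hpre
    simp [pvRepl] at hpre
    exact absurd hpre hne
  | cons c t ih =>
    intro s hne hlast hdrop hinf hpre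
    by_cases hp : k <+: (c :: t)
    · rw [pvRepl] at hpre
      have hb : k.isPrefixOf (c :: t) = true := List.isPrefixOf_iff_prefix.mpr hp
      simp only [hb, if_pos] at hpre
      by_cases hlen : s.length ≤ v.length
      · have hsv : s <+: v :=
          List.prefix_of_prefix_length_le hpre (List.prefix_append v _) hlen
        have : '}' ∈ v := hsv.subset (List.mem_of_getLast? hlast)
        exact absurd this hv
      · have hvs : v <+: s :=
          List.prefix_of_prefix_length_le (List.prefix_append v _) hpre (by omega)
        exact absurd hvs.isInfix hinf
    · rw [pvRepl_pass k v c t hp] at hpre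
      obtain ⟨s0, s', rfl⟩ := List.exists_cons_of_ne_nil hne
      rw [List.cons_prefix_cons] at hpre
      obtain ⟨rfl, hpre'⟩ := hpre
      cases s' with
      | nil => exact List.cons_prefix_cons.mpr ⟨rfl, List.nil_prefix⟩
      | cons s1 s'' =>
        have h1 : (s1 :: s'') ≠ [] := by simp
        have h2 : (s1 :: s'').getLast? = some '}' := by
          rw [← @List.getLast?_cons_cons _ s0 s1 s'']; exact hlast
        have h3 : '}' ∉ (s1 :: s'').dropLast := by
          intro hm
          exact hdrop (by rw [List.dropLast_cons₂]; exact List.mem_cons_of_mem _ hm)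
        have h4 : ¬ v <:+: (s1 :: s'') := by
          intro hm
          exact hinf (hm.trans (List.suffix_cons s0 (s1 :: s'')).isInfix)
        exact List.cons_prefix_cons.mpr ⟨rfl, ih _ h1 h2 h3 h4 hpre'⟩

-- the shape of a placeholder key
abbrev pvGoodKey (k : List Char) : Prop :=
  k.head? = some '{' ∧ k.tail ≠ [] ∧ '{' ∉ k.tail ∧
  k.tail.getLast? = some '}' ∧ '}' ∉ k.tail.dropLast

-- the sequential-replace chain, over char lists
def pvChain (L : List (List Char × List Char)) (l : List Char) : List Char :=
  L.foldl (fun p kv => pvRepl kv.1 kv.2 p) l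

theorem pvChain_cons (kv : List Char × List Char) (L : List (List Char × List Char)) (l : List Char) :
    pvChain (kv :: L) l = pvChain L (pvRepl kv.1 kv.2 l) := rfl

theorem pvChain_nil (L : List (List Char × List Char)) : pvChain L [] = [] := by
  induction L with
  | nil => rfl
  | cons kv L ih => rw [pvChain_cons]; simpa [pvRepl] using ih

theorem pvGoodKey_cons (k : List Char) (h : pvGoodKey k) : k = '{' :: k.tail := by
  cases k with
  | nil => obtain ⟨h1, _⟩ := h; simp at h1
  | cons a t => obtain ⟨h1, _⟩ := h; simp at h1; simp [h1]

-- a position where no placeholder matches stays a plain copied character through all passes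
theorem pvChain_pass (L : List (List Char × List Char)) (c : Char)
    (hK : ∀ kv ∈ L, pvGoodKey kv.1) (hV : ∀ kv ∈ L, '}' ∉ kv.2)
    (hC : ∀ kv ∈ L, ∀ kv' ∈ L, ¬ kv'.2 <:+: kv.1.tail) :
    ∀ y, (∀ kv ∈ L, ¬ kv.1 <+: (c :: y)) →
    pvChain L (c :: y) = c :: pvChain L y := by
  induction L with
  | nil => intro y _; rfl
  | cons kv1 L' ih =>
    intro y hnom
    rw [pvChain_cons, pvRepl_pass kv1.1 kv1.2 c y (hnom kv1 (List.mem_cons_self ..)), pvChain_cons]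
    have hnom' : ∀ kv ∈ L', ¬ kv.1 <+: (c :: pvRepl kv1.1 kv1.2 y) := by
      intro kv hm hpre
      have hgk := hK kv (List.mem_cons_of_mem _ hm)
      rw [pvGoodKey_cons kv.1 hgk, List.cons_prefix_cons] at hpre
      obtain ⟨hc, hpre'⟩ := hpre
      have ht : kv.1.tail <+: y := by
        refine pvNoCreate kv1.1 kv1.2 (hV kv1 (List.mem_cons_self ..)) y kv.1.tail
          hgk.2.1 hgk.2.2.2.1 hgk.2.2.2.2 ?_ hpre'
        exact hC kv (List.mem_cons_of_mem _ hm) kv1 (List.mem_cons_self ..)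
      refine hnom kv (List.mem_cons_of_mem _ hm) ?_
      rw [pvGoodKey_cons kv.1 hgk, List.cons_prefix_cons]
      exact ⟨hc, ht⟩
    exact ih (fun kv hm => hK kv (List.mem_cons_of_mem _ hm))
      (fun kv hm => hV kv (List.mem_cons_of_mem _ hm))
      (fun kv hm kv' hm' => hC kv (List.mem_cons_of_mem _ hm) kv' (List.mem_cons_of_mem _ hm'))
      (pvRepl kv1.1 kv1.2 y) hnom'

-- a brace-free block (a substituted value) passes through all passes unchanged
theorem pvChain_pass_clean (L : List (List Char × List Char))
    (hK : ∀ kv ∈ L, pvGoodKey kv.1) (hV : ∀ kv ∈ L, '}' ∉ kv.2)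
    (hC : ∀ kv ∈ L, ∀ kv' ∈ L, ¬ kv'.2 <:+: kv.1.tail) :
    ∀ p x, '{' ∉ p → pvChain L (p ++ x) = p ++ pvChain L x := by
  intro p
  induction p with
  | nil => simp
  | cons c p' ih =>
    intro x hp
    have hc : c ≠ '{' := fun h => hp (by simp [h])
    have hnom : ∀ kv ∈ L, ¬ kv.1 <+: (c :: (p' ++ x)) := fun kv hm =>
      pvNot_prefix_head kv.1 c _ (hK kv hm).1 hc
    rw [List.cons_append, pvChain_pass L c hK hV hC _ hnom,
      ih x (fun h => hp (List.mem_cons_of_mem _ h))]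
    rfl

-- a placeholder at the head is replaced by its value, and the value then passes through
theorem pvChain_hit (L : List (List Char × List Char)) (k v : List Char)
    (hK : ∀ kv ∈ L, pvGoodKey kv.1) (hV : ∀ kv ∈ L, '}' ∉ kv.2)
    (hV2 : ∀ kv ∈ L, '{' ∉ kv.2)
    (hC : ∀ kv ∈ L, ∀ kv' ∈ L, ¬ kv'.2 <:+: kv.1.tail)
    (hT : ∀ kv ∈ L, ∀ kv' ∈ L, kv.1 ≠ kv'.1 → ¬ (kv.1.take kv'.1.length <+: kv'.1))
    (hD : L.Pairwise (fun a b => a.1 ≠ b.1)) (hmem : (k, v) ∈ L) :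
    ∀ x, pvChain L (k ++ x) = v ++ pvChain L x := by
  induction L with
  | nil => simp at hmem
  | cons kv1 L' ih =>
    intro x
    rcases List.mem_cons.mp hmem with heq | hm
    · subst heq
      have hgk := hK (k, v) (List.mem_cons_self ..)
      have hkne : k ≠ [] := by
        intro h; rw [h] at hgk; exact absurd hgk.1 (by simp)
      rw [pvChain_cons, pvChain_cons]
      simp only [pvRepl_hit k v x hkne]
      exact pvChain_pass_clean L'
        (fun kv hm => hK kv (List.mem_cons_of_mem _ hm))
        (fun kv hm => hV kv (List.mem_cons_of_mem _ hm))
        (fun kv hm kv' hm' => hC kv (List.mem_cons_of_mem _ hm) kv' (List.mem_cons_of_mem _ hm'))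
        v (pvRepl k v x) (hV2 (k, v) (List.mem_cons_self ..))
    · have hne : kv1.1 ≠ k := (List.pairwise_cons.mp hD).1 (k, v) hm
      have hgk := hK (k, v) (List.mem_cons_of_mem _ hm)
      have hnp : ¬ kv1.1 <+: (k ++ x) := by
        intro h
        exact hT kv1 (List.mem_cons_self ..) (k, v) (List.mem_cons_of_mem _ hm) hne
          (pvTake_prefix_of_prefix_append kv1.1 k x h)
      have hkey : pvRepl kv1.1 kv1.2 (k ++ x) = k ++ pvRepl kv1.1 kv1.2 x := by
        conv_lhs => rw [pvGoodKey_cons k hgk]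
        rw [List.cons_append]
        rw [pvRepl_pass kv1.1 kv1.2 '{' (k.tail ++ x)
          (by rw [← List.cons_append, ← pvGoodKey_cons k hgk]; exact hnp)]
        rw [pvRepl_pass_clean kv1.1 kv1.2 (hK kv1 (List.mem_cons_self ..)).1 k.tail x hgk.2.2.1]
        rw [← List.cons_append, ← pvGoodKey_cons k hgk]
      rw [pvChain_cons, hkey, pvChain_cons]
      exact ih (fun kv hm => hK kv (List.mem_cons_of_mem _ hm))
        (fun kv hm => hV kv (List.mem_cons_of_mem _ hm))
        (fun kv hm => hV2 kv (List.mem_cons_of_mem _ hm))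
        (fun kv hm kv' hm' => hC kv (List.mem_cons_of_mem _ hm) kv' (List.mem_cons_of_mem _ hm'))
        (fun kv hm kv' hm' => hT kv (List.mem_cons_of_mem _ hm) kv' (List.mem_cons_of_mem _ hm'))
        (List.pairwise_cons.mp hD).2 hm (pvRepl kv1.1 kv1.2 x)

-- the concrete facts about the table
theorem pvGK : ∀ kv ∈ pvKeysB, pvGoodKey kv.1 := by decide
theorem pvGV : ∀ kv ∈ pvKeysB, '}' ∉ kv.2 := by decide
theorem pvGV2 : ∀ kv ∈ pvKeysB, '{' ∉ kv.2 := by decide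
theorem pvGC : ∀ kv ∈ pvKeysB, ∀ kv' ∈ pvKeysB, ¬ kv'.2 <:+: kv.1.tail := by decide
theorem pvGT : ∀ kv ∈ pvKeysB, ∀ kv' ∈ pvKeysB, kv.1 ≠ kv'.1 → ¬ (kv.1.take kv'.1.length <+: kv'.1) := by decide
theorem pvGD : pvKeysB.Pairwise (fun a b => a.1 ≠ b.1) := by decide
-- the two tables list the same placeholders: key = '{' ++ name ++ '}'
theorem pvMap : pvKeysB = pvNamesB.map (fun kv => ('{' :: (kv.1 ++ ['}']), kv.2)) := by decide
theorem pvNamesClean : ∀ kv ∈ pvNamesB, '}' ∉ kv.1 := by decide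

theorem pvScan_some (c : Char) (cs : List Char) (kv : List Char × List Char)
    (h : pvKeysB.find? (fun kv => kv.1.isPrefixOf (c :: cs)) = some kv) :
    pvScanB (c :: cs) = kv.2 ++ pvScanB (cs.drop (kv.1.length - 1)) := by
  rw [pvScanB, h]

theorem pvScan_none (c : Char) (cs : List Char)
    (h : pvKeysB.find? (fun kv => kv.1.isPrefixOf (c :: cs)) = none) :
    pvScanB (c :: cs) = c :: pvScanB cs := by
  rw [pvScanB, h]

-- equation lemmas for pvParseB
theorem pvParse_other (c : Char) (cs : List Char) (hc : c ≠ '{') :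
    pvParseB (c :: cs) = c :: pvParseB cs := by
  rw [pvParseB.eq_def]; simp [hc]

theorem pvParse_noclose (cs : List Char) (hj : pvFindClose cs = none) :
    pvParseB ('{' :: cs) = '{' :: pvParseB cs := by
  rw [pvParseB.eq_def]; simp [hj]

theorem pvParse_noname (cs : List Char) (j : Nat) (hj : pvFindClose cs = some j)
    (hfn : pvNamesB.find? (fun kv => kv.1 == cs.take j) = none) :
    pvParseB ('{' :: cs) = '{' :: pvParseB cs := by
  rw [pvParseB.eq_def]; simp [hj, hfn]

theorem pvParse_hit (cs : List Char) (j : Nat) (kv : List Char × List Char)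
    (hj : pvFindClose cs = some j)
    (hfn : pvNamesB.find? (fun kv => kv.1 == cs.take j) = some kv) :
    pvParseB ('{' :: cs) = kv.2 ++ pvParseB (cs.drop (j + 1)) := by
  rw [pvParseB.eq_def]; simp [hj, hfn]

-- the eight sequential passes compute exactly the single key scan
theorem pvMain : ∀ l, pvChain pvKeysB l = pvScanB l := by
  have main : ∀ n l, l.length ≤ n → pvChain pvKeysB l = pvScanB l := by
    intro n
    induction n with
    | zero =>
      intro l hl
      have : l = [] := List.eq_nil_of_length_eq_zero (Nat.le_zero.mp hl)
      subst this
      rw [pvChain_nil, pvScanB]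
    | succ n ih =>
      intro l hl
      cases l with
      | nil => rw [pvChain_nil, pvScanB]
      | cons c cs =>
        cases hfind : pvKeysB.find? (fun kv => kv.1.isPrefixOf (c :: cs)) with
        | some kv =>
          have hmem : kv ∈ pvKeysB := List.mem_of_find?_eq_some hfind
          have hpre : kv.1 <+: (c :: cs) := by
            have := List.find?_some (p := fun kv : List Char × List Char => kv.1.isPrefixOf (c :: cs)) hfind
            exact List.isPrefixOf_iff_prefix.mp this
          have hgk := pvGK kv hmem
          have hkne : kv.1 ≠ [] := by
            intro h; rw [h] at hgk; exact absurd hgk.1 (by simp)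
          obtain ⟨x, hx⟩ := hpre
          have hdrop : x = (c :: cs).drop kv.1.length := by
            rw [← hx, List.drop_left]
          have hxlen : x.length ≤ n := by
            have := congrArg List.length hx
            simp at this
            have h1 : 1 ≤ kv.1.length := by
              cases hk : kv.1 with
              | nil => exact absurd hk hkne
              | cons a b => simp
            simp at hl
            omega
          have hdrop2 : cs.drop (kv.1.length - 1) = x := by
            rw [hdrop]
            cases hk : kv.1 with
            | nil => exact absurd hk hkne
            | cons a b => simp
          rw [pvScan_some c cs kv hfind, hdrop2]
          conv_lhs => rw [← hx]
          rw [pvChain_hit pvKeysB kv.1 kv.2 pvGK pvGV pvGV2 pvGC pvGT pvGD hmem x,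
            ih x hxlen]
        | none =>
          have hnom : ∀ kv ∈ pvKeysB, ¬ kv.1 <+: (c :: cs) := by
            intro kv hm hpre
            have := List.find?_eq_none.mp hfind kv hm
            exact this (List.isPrefixOf_iff_prefix.mpr hpre)
          rw [pvChain_pass pvKeysB c pvGK pvGV pvGC cs hnom,
            pvScan_none c cs hfind, ih cs (by simp at hl; omega)]
  exact fun l => main l.length l le_rfl

-- pvFindClose characterisation
theorem pvFindClose_none : ∀ cs, pvFindClose cs = none → '}' ∉ cs := by
  intro cs
  induction cs with
  | nil => intro _; simp
  | cons c t ih =>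
    intro h
    rw [pvFindClose] at h
    by_cases hc : c = '}'
    · simp [hc] at h
    · simp only [hc, if_false] at h
      simp at h
      intro hm
      rcases List.mem_cons.mp hm with h1 | h1
      · exact hc h1.symm
      · exact (ih h) h1

theorem pvFindClose_some : ∀ cs j, pvFindClose cs = some j →
    '}' ∉ cs.take j ∧ (cs.take j).length = j ∧ cs.drop j = '}' :: cs.drop (j + 1) := by
  intro cs
  induction cs with
  | nil => intro j h; simp [pvFindClose] at h
  | cons c t ih =>
    intro j h
    rw [pvFindClose] at h
    by_cases hc : c = '}'
    · simp only [hc, if_pos] at h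
      have : j = 0 := by simpa using h.symm
      subst this
      simp [hc]
    · simp only [hc, if_false] at h
      simp only [Option.map_eq_some_iff] at h
      obtain ⟨j', hj', rfl⟩ := h
      obtain ⟨h1, h2, h3⟩ := ih j' hj'
      refine ⟨?_, by simpa using h2, by simpa using h3⟩
      intro hm
      rcases List.mem_cons.mp (by simpa using hm) with h4 | h4
      · exact hc h4.symm
      · exact h1 h4

theorem pvFindClose_unique : ∀ p r, '}' ∉ p → pvFindClose (p ++ '}' :: r) = some p.length := by
  intro p
  induction p with
  | nil => intro r _; simp [pvFindClose]
  | cons c p' ih =>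
    intro r hp
    have hc : c ≠ '}' := fun h => hp (by simp [h])
    rw [List.cons_append, pvFindClose, if_neg hc, ih r (fun h => hp (List.mem_cons_of_mem _ h))]
    simp

-- the key scan computes exactly B's brace parse
theorem pvScan_eq_parse : ∀ l, pvScanB l = pvParseB l := by
  have main : ∀ n l, l.length ≤ n → pvScanB l = pvParseB l := by
    intro n
    induction n with
    | zero =>
      intro l hl
      have : l = [] := List.eq_nil_of_length_eq_zero (Nat.le_zero.mp hl)
      subst this
      rw [pvScanB, pvParseB]
    | succ n ih =>
      intro l hl
      cases l with
      | nil => rw [pvScanB, pvParseB]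
      | cons c cs =>
        simp only [List.length_cons] at hl
        by_cases hc : c = '{'
        · subst hc
          cases hj : pvFindClose cs with
          | none =>
            have hnb : '}' ∉ cs := pvFindClose_none cs hj
            have hfind : pvKeysB.find? (fun kv => kv.1.isPrefixOf ('{' :: cs)) = none := by
              refine List.find?_eq_none.mpr (fun kv hm hpre => ?_)
              obtain ⟨nv, hnv, rfl⟩ := List.mem_map.mp (pvMap ▸ hm)
              have : (nv.1 ++ ['}']) <+: cs := by
                have := List.isPrefixOf_iff_prefix.mp hpre
                rw [List.cons_prefix_cons] at this
                exact this.2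
              exact hnb (this.subset (by simp))
            rw [pvScan_none _ _ hfind, pvParse_noclose cs hj, ih cs (by omega)]
          | some j =>
            obtain ⟨hclean, hlen, hdec⟩ := pvFindClose_some cs j hj
            have hcs : cs = cs.take j ++ '}' :: cs.drop (j + 1) := by
              conv_lhs => rw [← List.take_append_drop j cs, hdec]
            cases hfn : pvNamesB.find? (fun kv => kv.1 == cs.take j) with
            | none =>
              have hfind : pvKeysB.find? (fun kv => kv.1.isPrefixOf ('{' :: cs)) = none := by
                refine List.find?_eq_none.mpr (fun kv hm hpre => ?_)
                obtain ⟨nv, hnv, rfl⟩ := List.mem_map.mp (pvMap ▸ hm)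
                have hpre2 : (nv.1 ++ ['}']) <+: cs := by
                  have := List.isPrefixOf_iff_prefix.mp hpre
                  rw [List.cons_prefix_cons] at this
                  exact this.2
                obtain ⟨r2, hr2⟩ := hpre2
                rw [List.append_assoc] at hr2
                have hj2 : pvFindClose cs = some nv.1.length := by
                  rw [← hr2]
                  exact pvFindClose_unique nv.1 r2 (pvNamesClean nv hnv)
                have hjeq : nv.1.length = j := Option.some.inj (hj2.symm.trans hj)
                have htake : cs.take j = nv.1 := by
                  rw [← hr2, ← hjeq, List.take_left]
                have := List.find?_eq_none.mp hfn nv hnv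
                simp [htake] at this
              rw [pvScan_none _ _ hfind, pvParse_noname cs j hj hfn, ih cs (by omega)]
            | some nv =>
              have hnvm : nv ∈ pvNamesB := List.mem_of_find?_eq_some hfn
              have heqn : nv.1 = cs.take j := by
                have := List.find?_some (p := fun kv : List Char × List Char => kv.1 == cs.take j) hfn
                exact beq_iff_eq.mp this
              -- the full key is a prefix of '{' :: cs
              have hkmem : ('{' :: (nv.1 ++ ['}']), nv.2) ∈ pvKeysB := by
                rw [pvMap]
                exact List.mem_map.mpr ⟨nv, hnvm, rfl⟩
              have hkpre : ('{' :: (nv.1 ++ ['}'])) <+: ('{' :: cs) := by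
                rw [List.cons_prefix_cons]
                refine ⟨rfl, ?_⟩
                rw [heqn]
                conv_rhs => rw [hcs]
                exact ⟨List.drop (j + 1) cs, by simp⟩
              -- the key find? must return exactly this entry
              cases hfind : pvKeysB.find? (fun kv => kv.1.isPrefixOf ('{' :: cs)) with
              | none =>
                exact absurd (List.find?_eq_none.mp hfind _ hkmem
                  (List.isPrefixOf_iff_prefix.mpr hkpre)) (by simp)
              | some kv2 =>
                have hm2 : kv2 ∈ pvKeysB := List.mem_of_find?_eq_some hfind
                have hpre2 : kv2.1 <+: ('{' :: cs) :=
                  List.isPrefixOf_iff_prefix.mp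
                    (List.find?_some (p := fun kv : List Char × List Char => kv.1.isPrefixOf ('{' :: cs)) hfind)
                obtain ⟨nv2, hnv2, hkv2⟩ := List.mem_map.mp (pvMap ▸ hm2)
                have hpre3 : (nv2.1 ++ ['}']) <+: cs := by
                  rw [← hkv2] at hpre2
                  rw [List.cons_prefix_cons] at hpre2
                  exact hpre2.2
                obtain ⟨r2, hr2⟩ := hpre3
                rw [List.append_assoc] at hr2
                have hj2 : pvFindClose cs = some nv2.1.length := by
                  rw [← hr2]
                  exact pvFindClose_unique nv2.1 r2 (pvNamesClean nv2 hnv2)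
                have hjeq : nv2.1.length = j := Option.some.inj (hj2.symm.trans hj)
                have htake : nv2.1 = cs.take j := by
                  rw [← hr2, ← hjeq, List.take_left]
                have hkeys : kv2.1 = '{' :: (nv.1 ++ ['}']) := by
                  rw [← hkv2]; simp [htake, heqn]
                -- distinct keys ⇒ same entry
                have huniq : ∀ a ∈ pvKeysB, ∀ b ∈ pvKeysB, a.1 = b.1 → a = b := by decide
                have hkveq : kv2 = ('{' :: (nv.1 ++ ['}']), nv.2) := huniq kv2 hm2 _ hkmem hkeys
                rw [pvScan_some _ _ _ hfind, pvParse_hit cs j nv hj hfn, hkveq]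
                have hlen2 : ('{' :: (nv.1 ++ ['}'])).length - 1 = j + 1 := by
                  simp [heqn, hlen]
                rw [hlen2]
                congr 1
                exact ih _ (by simp only [List.length_drop]; omega)
        · have hfind : pvKeysB.find? (fun kv => kv.1.isPrefixOf (c :: cs)) = none := by
            refine List.find?_eq_none.mpr (fun kv hm hpre => ?_)
            exact pvNot_prefix_head kv.1 c cs (pvGK kv hm).1 hc
              (List.isPrefixOf_iff_prefix.mp hpre)
          rw [pvScan_none _ _ hfind, pvParse_other c cs hc, ih cs (by omega)]
  exact fun l => main l.length l le_rfl

theorem pvBridgeA (L : List (String × String)) (hne : ∀ kv ∈ L, kv.1.toList ≠ []) :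
    ∀ s : String,
      (L.foldl (fun p kv => PySem.Str.replace p kv.1 kv.2) s).toList =
        pvChain (L.map (fun kv => (kv.1.toList, kv.2.toList))) s.toList := by
  induction L with
  | nil => intro s; rfl
  | cons kv L' ih =>
    intro s
    rw [List.foldl_cons, List.map_cons, pvChain_cons,
      ih (fun kv hm => hne kv (List.mem_cons_of_mem _ hm))]
    congr 1
    rw [PySem.Str.toList_replace]
    exact pvReplace_eq kv.1.toList kv.2.toList s.toList (hne kv (List.mem_cons_self ..))

-- ===== VERDICT (by name: the statement is the Claim_ definition above) =====
theorem fill_path_spec : Claim_equal_fill_path := by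
  intro path ep_id _
  unfold Spec_fill_path fill_path fill_path_alt
  have h1 := pvBridgeA pvSamplesA (by decide) path
  have h3 : (pvSamplesA.foldl (fun p kv => PySem.Str.replace p kv.1 kv.2) path).toList
      = pvParseB path.toList := by rw [h1, ← pvKeysB, pvMain, pvScan_eq_parse]
  calc pvSamplesA.foldl (fun p kv => PySem.Str.replace p kv.1 kv.2) path
      = String.ofList (pvSamplesA.foldl (fun p kv => PySem.Str.replace p kv.1 kv.2) path).toList := by
        rw [String.ofList_toList]
    _ = String.ofList (pvParseB path.toList) := by rw [h3]
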